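-- pv_equiv track=rewrite | github.com/expr01/boj-solution | 프로그래머스/0/181916. 주사위 게임 3/주사위 게임 3.py | solution
-- ===== SOURCE A (Python) =====
-- def solution(a, b, c, d):
--     dice = [a, b, c, d]
--
--     counts = {x : 0 for x in range(1, 7)}
--     for num in dice:
--         counts[num] += 1
--
--     if 4 in counts.values():
--         return 1111 * dice[0]
--
--     elif 3 in counts.values():
--         p = [key for key, value in counts.items() if value == 3][0]
--         q = [key for key, value in counts.items() if value == 1][0]
--         return (10 * p + q) ** 2
--
--     elif list(counts.values()).count(2) == 2:
--         p, q = [key for key, value in counts.items() if value == 2]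
--         return (p + q) * abs(p - q)
--
--
--     elif 2 in counts.values() and list(counts.values()).count(1) == 2:
--         p = [key for key, value in counts.items() if value == 2][0]
--         q, r = [key for key, value in counts.items() if value == 1]
--         return q * r
--
--     else:
--         return min(dice)
-- ===== SOURCE B (Python) =====
-- def solution(a, b, c, d):
--     s = sorted([a, b, c, d])
--     if s[0] < 1 or s[3] > 6:
--         raise ValueError("die face out of range 1..6")
--     if s[0] == s[3]:
--         return 1111 * s[0]
--     if s[0] == s[2]:
--         return (10 * s[0] + s[3]) ** 2
--     if s[1] == s[3]:
--         return (10 * s[3] + s[0]) ** 2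
--     if s[0] == s[1] and s[2] == s[3]:
--         return (s[0] + s[2]) * abs(s[0] - s[2])
--     if s[0] == s[1]:
--         return s[2] * s[3]
--     if s[1] == s[2]:
--         return s[0] * s[3]
--     if s[2] == s[3]:
--         return s[0] * s[1]
--     return s[0]
-- ===== Notes on version B (the rewrite author's own statement) =====
-- stated objective: simpler
-- what changed: Replaced the dict-of-counts construction and repeated value-list scans by sorting the four dice once and classifying the match pattern with adjacent-element comparisons (with an explicit 1..6 face validation where A raises KeyError).
import Mathlib
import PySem

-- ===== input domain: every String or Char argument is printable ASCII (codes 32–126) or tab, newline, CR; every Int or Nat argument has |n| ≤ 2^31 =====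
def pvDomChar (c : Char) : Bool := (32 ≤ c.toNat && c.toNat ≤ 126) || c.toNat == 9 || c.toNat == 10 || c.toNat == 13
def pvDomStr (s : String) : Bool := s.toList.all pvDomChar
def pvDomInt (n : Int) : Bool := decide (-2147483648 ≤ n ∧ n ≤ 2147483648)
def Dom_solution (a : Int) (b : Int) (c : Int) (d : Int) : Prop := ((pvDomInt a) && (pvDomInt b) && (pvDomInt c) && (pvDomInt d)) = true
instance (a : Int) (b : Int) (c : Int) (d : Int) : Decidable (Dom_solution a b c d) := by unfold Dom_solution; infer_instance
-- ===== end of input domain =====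

-- B sorts the four dice once and classifies the pattern by adjacent-element
-- comparisons instead of building a 1..6 count table and scanning its values.


-- ===== PORT A =====
def solution (a : Int) (b : Int) (c : Int) (d : Int) : Int :=
  let dice : List Int := [a, b, c, d]
  let counts0 := (PySem.List.pyRange 1 7 1).foldl
    (fun dct x => dct.insert x (0 : Int)) PySem.Dict.empty
  -- counts[num] += 1 raises KeyError when num ∉ {1..6}; Pre_ excludes that,
  -- so modify (which is exact when the key is present) is faithful on Pre_.
  let counts := dice.foldl (fun dct num => dct.modify num 0 (· + 1)) counts0
  if (4 : Int) ∈ counts.values then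
    1111 * PySem.List.pyGetD dice 0 0
  else if (3 : Int) ∈ counts.values then
    let p := PySem.List.pyGetD ((counts.items.filter (fun kv => kv.2 == (3 : Int))).map (·.1)) 0 0
    let q := PySem.List.pyGetD ((counts.items.filter (fun kv => kv.2 == (1 : Int))).map (·.1)) 0 0
    (10 * p + q) ^ 2
  else if counts.values.count (2 : Int) == 2 then
    let pairs := (counts.items.filter (fun kv => kv.2 == (2 : Int))).map (·.1)
    let p := PySem.List.pyGetD pairs 0 0
    let q := PySem.List.pyGetD pairs 1 0
    (p + q) * (p - q).natAbs
  else if (2 : Int) ∈ counts.values && counts.values.count (1 : Int) == 2 then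
    let singles := (counts.items.filter (fun kv => kv.2 == (1 : Int))).map (·.1)
    let q := PySem.List.pyGetD singles 0 0
    let r := PySem.List.pyGetD singles 1 0
    q * r
  else
    (PySem.List.min? dice (fun x => x)).getD 0

-- ===== PORT B =====
-- Source B raises ValueError when a face is outside 1..6; the port returns 0 there
-- (unreachable inside Pre_solution, which excludes exactly those inputs).
def solution_alt (a : Int) (b : Int) (c : Int) (d : Int) : Int :=
  match PySem.List.sorted [a, b, c, d] id false with
  | [w, x, y, z] =>
    if w < 1 ∨ 6 < z then 0
    else if w = z then 1111 * w
    else if w = y then (10 * w + z) ^ 2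
    else if x = z then (10 * z + w) ^ 2
    else if w = x ∧ y = z then (w + y) * (w - y).natAbs
    else if w = x then y * z
    else if x = y then w * z
    else if y = z then w * x
    else w
  | _ => 0

-- ===== PRECONDITION & SPEC =====
-- Pre_ excludes dice outside 1..6, where A's counts[num] += 1 raises KeyError.
def Pre_solution (a : Int) (b : Int) (c : Int) (d : Int) : Prop :=
  a ∈ ([1, 2, 3, 4, 5, 6] : List Int) ∧ b ∈ ([1, 2, 3, 4, 5, 6] : List Int) ∧
  c ∈ ([1, 2, 3, 4, 5, 6] : List Int) ∧ d ∈ ([1, 2, 3, 4, 5, 6] : List Int)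
instance (a : Int) (b : Int) (c : Int) (d : Int) : Decidable (Pre_solution a b c d) := by
  unfold Pre_solution; infer_instance
def pvWitness_solution : Int × Int × Int × Int := (2, 2, 5, 5)

def Spec_solution (a : Int) (b : Int) (c : Int) (d : Int) (out : Int) : Prop := out = solution_alt a b c d
instance (a : Int) (b : Int) (c : Int) (d : Int) (out : Int) : Decidable (Spec_solution a b c d out) := by unfold Spec_solution; infer_instance

-- ===== CLAIM =====
def Claim_equal_solution : Prop := ∀ (a : Int) (b : Int) (c : Int) (d : Int),
  Dom_solution a b c d → Pre_solution a b c d → Spec_solution a b c d (solution a b c d)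

-- ===== LEMMAS AND PROOFS =====

-- ===== VERDICT =====
theorem solution_spec : Claim_equal_solution := by
  intro a b c d _ hpre
  obtain ⟨ha, hb, hc, hd⟩ := hpre
  unfold Spec_solution
  fin_cases ha <;> fin_cases hb <;> fin_cases hc <;> fin_cases hd <;> decide
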